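-- pv_equiv track=rewrite | github.com/ryo-murai/atcoder100forbeginners | src/03_batcoder_acgt_string.py | len_acgt
-- ===== SOURCE A (Python) =====
-- def len_acgt(s: str):
--     max = 0
--     curr = 0
--     for c in s:
--         if c in "ACGT":
--             curr = curr + 1
--             if curr > max:
--                 max = curr
--         else:
--             curr = 0
--     return max
-- ===== SOURCE B (Python) =====
-- def len_acgt(s: str):
--     # Two-pointer run scanner: locate each maximal run of ACGT chars and keep the longest.
--     best = 0
--     i = 0
--     n = len(s)
--     while i < n:
--         if s[i] in "ACGT":
--             j = i + 1
--             while j < n and s[j] in "ACGT":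
--                 j += 1
--             if j - i > best:
--                 best = j - i
--             i = j
--         else:
--             i += 1
--     return best
-- ===== Notes on version B (the rewrite author's own statement) =====
-- stated objective: alternative
-- what changed: B replaces A's per-character running-counter fold with a two-pointer scan that jumps from one maximal ACGT run to the next and records each run's length directly.
import Mathlib
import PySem

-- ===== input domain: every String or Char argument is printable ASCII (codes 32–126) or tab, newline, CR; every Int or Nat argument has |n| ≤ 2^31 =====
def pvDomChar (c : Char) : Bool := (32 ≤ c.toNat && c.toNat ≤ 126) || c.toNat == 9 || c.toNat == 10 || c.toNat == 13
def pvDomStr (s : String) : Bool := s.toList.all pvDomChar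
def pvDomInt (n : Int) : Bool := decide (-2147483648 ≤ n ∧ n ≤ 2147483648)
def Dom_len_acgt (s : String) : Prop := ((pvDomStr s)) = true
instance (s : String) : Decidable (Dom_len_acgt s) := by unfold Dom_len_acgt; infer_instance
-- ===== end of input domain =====

-- B replaces A's per-character running-counter fold with a two-pointer scan over maximal ACGT runs (objective: alternative).

-- ===== PORT A =====
-- shared helper: the test  c in "ACGT"  for a single character
def isACGT (c : Char) : Bool := c = 'A' || c = 'C' || c = 'G' || c = 'T'

-- A's loop body; state = (max, curr)
def stepA (st : Int × Int) (c : Char) : Int × Int :=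
  if isACGT c then
    let curr := st.2 + 1
    (if curr > st.1 then curr else st.1, curr)
  else (st.1, 0)

def len_acgt (s : String) : Int :=
  (s.toList.foldl stepA (0, 0)).1

-- ===== PORT B =====
-- inner while loop of B: advance j while s[j] is a valid character
def altScan (cs : List Char) (j : Nat) : Nat :=
  if h : j < cs.length then
    if isACGT cs[j] then altScan cs (j + 1) else j
  else j
termination_by cs.length - j

-- needed by altGo's decreasing_by: the inner scan never moves j backwards
theorem altScan_ge (cs : List Char) (j : Nat) : j ≤ altScan cs j := by
  fun_induction altScan cs j with
  | case1 => omega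
  | case2 => omega
  | case3 => omega

-- outer while loop of B: skip invalid characters; at a run start, scan to its end and record its length
def altGo (cs : List Char) (i : Nat) (best : Nat) : Nat :=
  if h : i < cs.length then
    if isACGT cs[i] then
      let j := altScan cs (i + 1)
      altGo cs j (if j - i > best then j - i else best)
    else altGo cs (i + 1) best
  else best
termination_by cs.length - i
decreasing_by
  · have : i + 1 ≤ altScan cs (i + 1) := altScan_ge cs (i+1)
    omega
  · omega

def len_acgt_alt (s : String) : Int :=
  (altGo s.toList 0 0 : Nat)

-- ===== PRECONDITION & SPEC =====
def Spec_len_acgt (s : String) (out : Int) : Prop := out = len_acgt_alt s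
instance (s : String) (out : Int) : Decidable (Spec_len_acgt s out) := by unfold Spec_len_acgt; infer_instance

-- ===== CLAIM (what is proved, stated in full; the proofs are below) =====
def Claim_equal_len_acgt : Prop := ∀ (s : String), Dom_len_acgt s → Spec_len_acgt s (len_acgt s)

-- ===== LEMMAS AND PROOFS =====
theorem altScan_le (cs : List Char) (j : Nat) (h : j ≤ cs.length) :
    altScan cs j ≤ cs.length := by
  fun_induction altScan cs j with
  | case1 j h1 h2 ih => exact ih (by omega)
  | case2 => omega
  | case3 => omega


-- every index in [j, altScan cs j) holds a valid character
theorem altScan_valid (cs : List Char) (j : Nat) :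
    ∀ k, j ≤ k → k < altScan cs j → ∃ hk : k < cs.length, isACGT cs[k] = true := by
  fun_induction altScan cs j with
  | case1 j hlt hv ih =>
    intro k hk1 hk2
    rcases Nat.eq_or_lt_of_le hk1 with heq | hlt'
    · exact ⟨by omega, by subst heq; exact hv⟩
    · exact ih k (by omega) hk2
  | case2 => omega
  | case3 => omega


-- the character where the scan stops (if any) is invalid
theorem altScan_stop (cs : List Char) (j : Nat) (hk : altScan cs j < cs.length) :
    isACGT cs[altScan cs j] = false := by
  fun_induction altScan cs j with
  | case1 j hlt hv ih => exact ih hk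
  | case2 j hlt hv => exact Bool.not_eq_true _ ▸ hv
  | case3 => omega


-- A's fold over a run of all-valid characters
theorem foldA_run (run : List Char) (h : ∀ c ∈ run, isACGT c = true) (m c : Int)
    (hc : c ≤ m) :
    run.foldl stepA (m, c) = (max m (c + run.length), c + run.length) := by
  induction run generalizing m c with
  | nil =>
    simp only [List.foldl_nil, List.length_nil, Nat.cast_zero, add_zero]
    rw [max_eq_left hc]
  | cons x xs ih =>
    have hx : isACGT x = true := h x (List.mem_cons_self)
    have hxs : ∀ c ∈ xs, isACGT c = true := fun c hc => h c (List.mem_cons_of_mem _ hc)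
    simp only [List.foldl_cons, stepA, hx, if_pos]
    rw [ih hxs _ _ (by split_ifs <;> omega)]
    refine Prod.ext ?_ ?_
    · simp only [Int.max_def, List.length_cons]
      split_ifs <;> push_cast <;> omega
    · simp only [List.length_cons]
      push_cast
      ring


-- keystone: A's fold from position i with curr = 0 computes B's scan from i
theorem altGo_eq (cs : List Char) (i best : Nat) (hi : i ≤ cs.length) :
    ((cs.drop i).foldl stepA ((best : Int), 0)).1 = ((altGo cs i best : Nat) : Int) := by
  fun_induction altGo cs i best with
  | case1 i best hlt hv j ih =>
    have hj0 : j = altScan cs (i + 1) := rfl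
    have hij : i + 1 ≤ j := by rw [hj0]; exact altScan_ge cs (i + 1)
    have hjlen : j ≤ cs.length := by rw [hj0]; exact altScan_le cs (i + 1) (by omega)
    have hsplit : cs.drop (i + 1) =
        ((cs.drop (i + 1)).take (j - (i + 1))) ++ cs.drop j := by
      conv_lhs => rw [← List.take_append_drop (j - (i + 1)) (cs.drop (i + 1))]
      rw [List.drop_drop]
      congr 2
      omega
    have hrunlen : ((cs.drop (i + 1)).take (j - (i + 1))).length = j - (i + 1) := by
      rw [List.length_take, List.length_drop]; omega
    have hrunvalid : ∀ c ∈ (cs.drop (i + 1)).take (j - (i + 1)), isACGT c = true := by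
      intro c hcmem
      rw [List.mem_iff_getElem] at hcmem
      obtain ⟨k, hk, hck⟩ := hcmem
      rw [hrunlen] at hk
      rw [List.getElem_take, List.getElem_drop] at hck
      obtain ⟨_, hval⟩ := altScan_valid cs (i + 1) (i + 1 + k) (by omega) (by rw [← hj0]; omega)
      exact hck ▸ hval
    rw [List.drop_eq_getElem_cons hlt, List.foldl_cons]
    have hstep : stepA ((best : Int), 0) cs[i] = (max (best : Int) 1, 1) := by
      simp only [stepA, hv, if_pos, zero_add]
      refine Prod.ext ?_ rfl
      simp only [Int.max_def, gt_iff_lt]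
      split_ifs <;> omega
    rw [hstep, hsplit, List.foldl_append,
        foldA_run _ hrunvalid (max (best : Int) 1) 1 (le_max_right _ _), hrunlen]
    have hBmax : max (max (best : Int) 1) (1 + ((j - (i + 1) : Nat) : Int)) =
        ((if j - i > best then j - i else best : Nat) : Int) := by
      simp only [Int.max_def]
      split_ifs <;> omega
    rw [hBmax]
    have hreset :
        ((cs.drop j).foldl stepA
            (((if j - i > best then j - i else best : Nat) : Int),
             1 + ((j - (i + 1) : Nat) : Int))).1 =
        ((cs.drop j).foldl stepA
            (((if j - i > best then j - i else best : Nat) : Int), 0)).1 := by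
      cases hdj : cs.drop j with
      | nil => simp
      | cons d ds =>
        have hjlt : j < cs.length := by
          by_contra hcon
          have hnil : cs.drop j = [] := List.drop_eq_nil_of_le (by omega)
          simp [hnil] at hdj
        have hcons := List.drop_eq_getElem_cons (l := cs) hjlt
        rw [hdj] at hcons
        injection hcons with hd _
        have hstop : isACGT d = false := by
          have hjlt' : altScan cs (i + 1) < cs.length := hj0 ▸ hjlt
          have h1 : isACGT cs[j] = false := altScan_stop cs (i + 1) hjlt'
          rw [hd]
          exact h1
        have hsd : ∀ C X : Int, stepA (X, C) d = (X, 0) := by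
          intro C X
          simp [stepA, hstop]
        simp only [List.foldl_cons, hsd]
    rw [hreset]
    exact ih hjlen
  | case2 i best hlt hv ih =>
    rw [List.drop_eq_getElem_cons hlt, List.foldl_cons]
    have hstep : stepA ((best : Int), 0) cs[i] = ((best : Int), 0) := by
      simp [stepA, hv]
    rw [hstep]
    exact ih (by omega)
  | case3 i best h =>
    have hnil : cs.drop i = [] := List.drop_eq_nil_of_le (by omega)
    simp [hnil]

-- ===== VERDICT (by name: the statement is the Claim_ definition above) =====
theorem len_acgt_spec : Claim_equal_len_acgt := by
  intro s _
  unfold Spec_len_acgt len_acgt len_acgt_alt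
  simpa using altGo_eq s.toList 0 0 (by omega)
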